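-- pv_equiv track=rewrite | github.com/franditt/Tibansim | bos.py | extract_command
-- ===== SOURCE A (Python) =====
-- def extract_command(raw):
--     text = ""
--     sender = ""
--     for line in raw.splitlines():
--         line = line.strip()
--         if "Number:" in line:
--             sender = line.split("Number:", 1)[1].strip()
--         if "Text:" in line:
--             text = line.split("Text:", 1)[1].strip()
--     return sender, text.strip()
-- ===== SOURCE B (Python) =====
-- def extract_command(raw):
--     sender = ""
--     text = ""
--     found_sender = False
--     found_text = False
--     for line in reversed(raw.splitlines()):
--         line = line.strip()
--         if not found_sender and "Number:" in line:
--             sender = line.split("Number:", 1)[1].strip()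
--             found_sender = True
--         if not found_text and "Text:" in line:
--             text = line.split("Text:", 1)[1].strip()
--             found_text = True
--         if found_sender and found_text:
--             break
--     return sender, text.strip()
-- ===== Notes on version B (the rewrite author's own statement) =====
-- stated objective: alternative
-- what changed: B scans the lines in reverse with found-flags and an early break, taking the first match from the end instead of A's forward overwrite-to-the-last pass.
import Mathlib
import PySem

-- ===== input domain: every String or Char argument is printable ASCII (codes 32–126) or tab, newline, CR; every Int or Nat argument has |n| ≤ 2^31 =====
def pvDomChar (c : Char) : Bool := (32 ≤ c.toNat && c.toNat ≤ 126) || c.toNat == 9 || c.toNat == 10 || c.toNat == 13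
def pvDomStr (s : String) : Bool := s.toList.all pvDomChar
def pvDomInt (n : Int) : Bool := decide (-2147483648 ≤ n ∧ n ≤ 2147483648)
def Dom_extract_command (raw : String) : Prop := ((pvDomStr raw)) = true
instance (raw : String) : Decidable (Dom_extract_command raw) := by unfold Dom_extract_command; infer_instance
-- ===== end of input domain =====

-- B replaces A's forward overwrite-each-match pass by a reverse scan with found-flags and an
-- early break (objective: alternative decomposition, same result).

-- shared transliteration of `line.split(sep, 1)[1].strip()` (both Pythons contain this exact expression)
def pvAfter (l sep : String) : String :=
  PySem.Str.strip ((PySem.List.pyGet? ((PySem.Str.splitMax? l sep 1).getD []) 1).getD "")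

-- ===== PORT A =====
def extract_command (raw : String) : String × String :=
  let st := (PySem.Str.splitlines raw).foldl
    (fun (st : String × String) line =>
      let l := PySem.Str.strip line
      let sender := if PySem.Str.isIn "Number:" l then pvAfter l "Number:" else st.1
      let text := if PySem.Str.isIn "Text:" l then pvAfter l "Text:" else st.2
      (sender, text))
    ("", "")
  (st.1, PySem.Str.strip st.2)

-- ===== PORT B =====
def extract_command_alt_go : List String → String → String → Bool → Bool → String × String
  | [], sender, text, _, _ => (sender, text)
  | line :: rest, sender, text, fs, ft =>
    let l := PySem.Str.strip line
    let sender' := if !fs && PySem.Str.isIn "Number:" l then pvAfter l "Number:" else sender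
    let fs' := if !fs && PySem.Str.isIn "Number:" l then true else fs
    let text' := if !ft && PySem.Str.isIn "Text:" l then pvAfter l "Text:" else text
    let ft' := if !ft && PySem.Str.isIn "Text:" l then true else ft
    if fs' && ft' then (sender', text')
    else extract_command_alt_go rest sender' text' fs' ft'

def extract_command_alt (raw : String) : String × String :=
  let st := extract_command_alt_go (PySem.Str.splitlines raw).reverse "" "" false false
  (st.1, PySem.Str.strip st.2)

-- ===== PRECONDITION & SPEC =====
def Spec_extract_command (raw : String) (out : String × String) : Prop := out = extract_command_alt raw
instance (raw : String) (out : String × String) : Decidable (Spec_extract_command raw out) := by unfold Spec_extract_command; infer_instance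

-- ===== CLAIM (what is proved, stated in full; the proofs are below) =====
def Claim_equal_extract_command : Prop := ∀ (raw : String), Dom_extract_command raw → Spec_extract_command raw (extract_command raw)

-- ===== LEMMAS AND PROOFS =====

-- The value both programs compute for a tag: the first stripped line FROM THE END (of M, already
-- reversed for B) containing sep, with pvAfter applied; the default if none contains it.
def pvLast (M : List String) (sep dflt : String) : String :=
  match M.find? (fun line => PySem.Str.isIn sep (PySem.Str.strip line)) with
  | some line => pvAfter (PySem.Str.strip line) sep
  | none => dflt

theorem pvLast_nil (sep dflt : String) : pvLast [] sep dflt = dflt := rfl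

theorem pvLast_cons (x : String) (M : List String) (sep dflt : String) :
    pvLast (x :: M) sep dflt =
      if PySem.Str.isIn sep (PySem.Str.strip x) then pvAfter (PySem.Str.strip x) sep
      else pvLast M sep dflt := by
  unfold pvLast
  rw [List.find?_cons]
  cases h : PySem.Chars.isIn sep.toList (PySem.Chars.strip x.toList) <;> simp [h]

theorem pvLast_append_singleton (M : List String) (x : String) (sep dflt : String) :
    pvLast (M ++ [x]) sep dflt =
      pvLast M sep (if PySem.Str.isIn sep (PySem.Str.strip x) then pvAfter (PySem.Str.strip x) sep else dflt) := by
  induction M with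
  | nil => simp [pvLast_cons, pvLast_nil]
  | cons y M ih => rw [List.cons_append, pvLast_cons, pvLast_cons, ih]

-- A's fold computes, from any start state, the last-occurrence values.
theorem foldA_spec (L : List String) (s t : String) :
    L.foldl
      (fun (st : String × String) line =>
        let l := PySem.Str.strip line
        let sender := if PySem.Str.isIn "Number:" l then pvAfter l "Number:" else st.1
        let text := if PySem.Str.isIn "Text:" l then pvAfter l "Text:" else st.2
        (sender, text))
      (s, t)
    = (pvLast L.reverse "Number:" s, pvLast L.reverse "Text:" t) := by
  induction L generalizing s t with
  | nil => simp [pvLast_nil]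
  | cons x L ih =>
      rw [List.foldl_cons, ih]
      simp only [List.reverse_cons, pvLast_append_singleton]

-- B's reverse scan with flags computes the first-occurrence values (of its argument list),
-- unless a flag is already set.
theorem goB_spec (M : List String) (s t : String) (fs ft : Bool) :
    extract_command_alt_go M s t fs ft =
      ((if fs then s else pvLast M "Number:" s),
       (if ft then t else pvLast M "Text:" t)) := by
  induction M generalizing s t fs ft with
  | nil => cases fs <;> cases ft <;> simp [extract_command_alt_go, pvLast_nil]
  | cons x M ih =>
      rw [extract_command_alt_go]
      simp only [pvLast_cons]
      cases hn : PySem.Chars.isIn ['N', 'u', 'm', 'b', 'e', 'r', ':'] (PySem.Chars.strip x.toList) <;>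
        cases ht : PySem.Chars.isIn ['T', 'e', 'x', 't', ':'] (PySem.Chars.strip x.toList) <;>
        cases fs <;> cases ft <;> simp [hn, ht, ih]

-- ===== VERDICT (by name: the statement is the Claim_ definition above) =====
theorem extract_command_spec : Claim_equal_extract_command := by
  intro raw _
  unfold Spec_extract_command extract_command extract_command_alt
  rw [foldA_spec, goB_spec]
  simp
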